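-- pv_equiv track=rewrite | github.com/Jimraan/powerSetter | powerSetter.py | k_subsets_better
-- ===== SOURCE A (Python) =====
-- import copy
--
-- def power_set(S):
--     if len(S) == 0:
--         return [[]]
--
--     x = S[-1]
--     list1 = power_set(S[:-1])
--     list2 = copy.deepcopy(list1)
--
--     for i in list2:
--         i.append(x)
--
--     return list1 + list2
--
-- def k_subsets_better(S, k):
--     if k == len(S):
--         return [S]
--     else:
--         copy_set = copy.deepcopy(S)
--         x = copy_set.pop(1)
--         result = k_subsets_better(copy_set, k)
--         sets = power_set(S)
--         [result.append(sets) for sets in sets if len(sets) == k and sets not in result]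
--
--         return result
-- ===== SOURCE B (Python) =====
-- # B: same recursion skeleton, but generates the size-k subsets directly in
-- # power-set (mask) order instead of enumerating all 2^n subsets, and dedups
-- # with a set of tuples instead of repeated list scans.
--
-- def _combos(T, k):
--     # all k-element sublists of T, in the order power_set(T) would list them
--     if k == 0:
--         return [[]]
--     if len(T) < k:
--         return []
--     x = T[-1]
--     rest = T[:-1]
--     return _combos(rest, k) + [c + [x] for c in _combos(rest, k - 1)]
--
-- def k_subsets_better(S, k):
--     if k == len(S):
--         return [S]
--     rest = list(S)
--     rest.pop(1)
--     result = k_subsets_better(rest, k)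
--     seen = set(map(tuple, result))
--     for c in _combos(S, k):
--         t = tuple(c)
--         if t not in seen:
--             seen.add(t)
--             result.append(c)
--     return result
-- ===== Notes on version B (the rewrite author's own statement) =====
-- stated objective: faster
-- what changed: B generates the size-k subsets directly in power-set (mask) order via a binomial recursion instead of enumerating all 2^n subsets and filtering, and dedups against a set of tuples instead of rescanning the result list.
import Mathlib
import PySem

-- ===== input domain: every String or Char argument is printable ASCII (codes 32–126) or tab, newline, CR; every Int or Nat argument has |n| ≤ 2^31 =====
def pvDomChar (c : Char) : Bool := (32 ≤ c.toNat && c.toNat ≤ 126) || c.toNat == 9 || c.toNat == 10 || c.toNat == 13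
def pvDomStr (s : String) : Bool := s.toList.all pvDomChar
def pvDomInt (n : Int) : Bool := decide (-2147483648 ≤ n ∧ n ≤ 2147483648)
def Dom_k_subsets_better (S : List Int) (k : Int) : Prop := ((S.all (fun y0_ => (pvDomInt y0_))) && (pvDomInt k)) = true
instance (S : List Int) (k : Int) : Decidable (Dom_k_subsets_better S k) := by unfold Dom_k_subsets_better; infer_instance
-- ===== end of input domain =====

-- B replaces A's full 2^n power-set enumeration + quadratic list-membership dedup
-- with direct generation of the size-k subsets in the same order + a set-based dedup.

-- ===== PORT A =====
def power_set (S : List Int) : List (List Int) :=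
  match S with
  | [] => [[]]
  | a :: t =>
    let x := (a :: t).getLast (by simp)
    let list1 := power_set (a :: t).dropLast
    list1 ++ list1.map (fun i => i ++ [x])
termination_by S.length
decreasing_by simp

def k_subsets_better (S : List Int) (k : Int) : List (List Int) :=
  if k = (S.length : Int) then [S]
  else
    match h : PySem.List.pop? S 1 with
    | none => []   -- Python raises IndexError here (len(S) < 2); excluded by Pre_
    | some r =>
      let result := k_subsets_better r.2 k
      (power_set S).foldl
        (fun res t => if (t.length : Int) = k ∧ t ∉ res then res ++ [t] else res) result
termination_by S.length
decreasing_by have := PySem.List.length_of_pop?_eq_some (h := h); omega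

-- ===== PORT B =====
-- helper _combos: all k-element sublists of T, in the order power_set(T) lists them
def combosB (T : List Int) (k : Int) : List (List Int) :=
  if k = 0 then [[]]
  else if (T.length : Int) < k then []
  else
    match T with
    | [] => []   -- unreachable from k_subsets_better_alt (only k < 0 gets here; Python would raise earlier)
    | a :: t =>
      combosB (a :: t).dropLast k
        ++ (combosB (a :: t).dropLast (k - 1)).map (fun c => c ++ [(a :: t).getLast (by simp)])
termination_by T.length
decreasing_by all_goals simp

def k_subsets_better_alt (S : List Int) (k : Int) : List (List Int) :=
  if k = (S.length : Int) then [S]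
  else
    match h : PySem.List.pop? S 1 with
    | none => []   -- Python raises IndexError here (len(S) < 2); excluded by Pre_
    | some r =>
      let result := k_subsets_better_alt r.2 k
      ((combosB S k).foldl
        (fun p c => if PySem.Set.contains p.1 c then p else (PySem.Set.add p.1 c, p.2 ++ [c]))
        (PySem.Set.ofList result, result)).2
termination_by S.length
decreasing_by have := PySem.List.length_of_pop?_eq_some (h := h); omega

-- ===== PRECONDITION & SPEC =====
-- Pre_ excludes exactly the inputs where A raises IndexError (pop(1) eventually fails):
-- k must equal len(S) or satisfy 1 ≤ k < len(S).  (B raises on the same inputs.)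
def Pre_k_subsets_better (S : List Int) (k : Int) : Prop :=
  k = (S.length : Int) ∨ (1 ≤ k ∧ k < (S.length : Int))
instance (S : List Int) (k : Int) : Decidable (Pre_k_subsets_better S k) := by
  unfold Pre_k_subsets_better; infer_instance
def pvWitness_k_subsets_better : List Int × Int := ([1, 2, 3], 2)

def Spec_k_subsets_better (S : List Int) (k : Int) (out : List (List Int)) : Prop := out = k_subsets_better_alt S k
instance (S : List Int) (k : Int) (out : List (List Int)) : Decidable (Spec_k_subsets_better S k out) := by unfold Spec_k_subsets_better; infer_instance

-- ===== CLAIM (what is proved, stated in full; the proofs are below) =====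
def Claim_equal_k_subsets_better : Prop := ∀ (S : List Int) (k : Int), Dom_k_subsets_better S k → Pre_k_subsets_better S k → Spec_k_subsets_better S k (k_subsets_better S k)

-- ===== LEMMAS AND PROOFS =====

-- power_set over a snoc
lemma power_set_append (T : List Int) (x : Int) :
    power_set (T ++ [x]) = power_set T ++ (power_set T).map (fun i => i ++ [x]) := by
  rw [power_set.eq_def]
  cases T with
  | nil => simp [power_set]
  | cons a t =>
    have hd : (a :: (t ++ [x])).dropLast = a :: t := by
      rw [← List.cons_append, List.dropLast_concat]
    simp [hd]

-- combosB over a snoc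
lemma combosB_append (T : List Int) (x : Int) (k : Int) :
    combosB (T ++ [x]) k =
      if k = 0 then [[]]
      else if ((T.length : Int) + 1) < k then []
      else combosB T k ++ (combosB T (k - 1)).map (fun c => c ++ [x]) := by
  rw [combosB.eq_def]
  cases T with
  | nil => simp
  | cons a t =>
    have hd : (a :: (t ++ [x])).dropLast = a :: t := by
      rw [← List.cons_append, List.dropLast_concat]
    simp [hd]

lemma combosB_neg (T : List Int) : ∀ k : Int, k < 0 → combosB T k = [] := by
  induction T using List.reverseRecOn with
  | nil =>
    intro k hk
    rw [combosB.eq_def]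
    simp only [if_neg (by omega : ¬ k = 0)]
    split <;> rfl
  | append_singleton T x ih =>
    intro k hk
    rw [combosB_append]
    simp [if_neg (by omega : ¬ k = 0), ih k hk, ih (k - 1) (by omega)]

lemma combosB_lt (T : List Int) (k : Int) (h0 : k ≠ 0) (h : (T.length : Int) < k) :
    combosB T k = [] := by
  rw [combosB.eq_def]
  simp [h0, h]


-- the size-k layer of the power set is exactly combosB
lemma filter_power_set (T : List Int) (k : Int) :
    (power_set T).filter (fun t => decide ((t.length : Int) = k)) = combosB T k := by
  induction T using List.reverseRecOn generalizing k with
  | nil =>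
    rw [power_set.eq_def, combosB.eq_def]
    by_cases hk : k = 0
    · subst hk; simp
    · simp only [if_neg hk]
      have hp : (([[]] : List (List Int)).filter (fun t => decide ((t.length : Int) = k))) = [] := by
        simp [Ne.symm hk]
      rw [hp]
      split <;> rfl
  | append_singleton T x ih =>
    rw [power_set_append, combosB_append, List.filter_append]
    have hmap : (List.map (fun i => i ++ [x]) (power_set T)).filter
        (fun t => decide ((t.length : Int) = k))
        = List.map (fun i => i ++ [x])
            ((power_set T).filter (fun t => decide ((t.length : Int) = k - 1))) := by
      rw [List.filter_map]
      congr 1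
      apply List.filter_congr
      intro t _
      simp only [Function.comp_apply, List.length_append, List.length_singleton]
      rw [decide_eq_decide]
      push_cast
      omega
    rw [hmap, ih, ih]
    by_cases hk : k = 0
    · subst hk
      rw [if_pos rfl]
      have h1 : combosB T 0 = [[]] := by rw [combosB.eq_def]; simp
      have h2 : combosB T (-1 : Int) = [] := combosB_neg T _ (by omega)
      simp [h1, h2]
    · rw [if_neg hk]
      by_cases hlt : ((T.length : Int) + 1) < k
      · rw [if_pos hlt]
        have h1 : combosB T k = [] := combosB_lt T k hk (by omega)
        have h2 : combosB T (k - 1) = [] := by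
          by_cases hk1 : k - 1 = 0
          · exfalso; omega
          · exact combosB_lt T (k - 1) hk1 (by omega)
        simp [h1, h2]
      · rw [if_neg hlt]

-- A's combined filter-and-dedup loop = dedup loop over the filtered list
lemma foldl_if_and (k : Int) (L : List (List Int)) (res : List (List Int)) :
    L.foldl (fun res t => if (t.length : Int) = k ∧ t ∉ res then res ++ [t] else res) res
      = (L.filter (fun t => decide ((t.length : Int) = k))).foldl
          (fun res t => if t ∉ res then res ++ [t] else res) res := by
  induction L generalizing res with
  | nil => rfl
  | cons t L ih =>
    by_cases hl : (t.length : Int) = k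
    · simp only [List.foldl_cons, List.filter_cons, hl, decide_true, if_true]
      by_cases hm : t ∈ res
      · simp [hm, ih]
      · simp [hm, ih]
    · simp only [List.foldl_cons, List.filter_cons, hl, decide_false]
      simp [ih]

-- B's (seen, result) loop computes A's membership-dedup loop
lemma foldl_pair (L : List (List Int)) (seen : PySem.Set (List Int)) (res : List (List Int))
    (h : ∀ t, t ∈ seen ↔ t ∈ res) :
    (L.foldl (fun p c => if PySem.Set.contains p.1 c then p else (PySem.Set.add p.1 c, p.2 ++ [c]))
        (seen, res)).2
      = L.foldl (fun res t => if t ∉ res then res ++ [t] else res) res := by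
  induction L generalizing seen res with
  | nil => rfl
  | cons c L ih =>
    simp only [List.foldl_cons]
    by_cases hm : c ∈ res
    · have hc : PySem.Set.contains seen c = true := by
        rw [PySem.Set.contains_iff]; exact (h c).2 hm
      simp only [hc, if_true, if_neg (not_not_intro hm)]
      exact ih seen res h
    · have hc : PySem.Set.contains seen c = false := by
        rw [Bool.eq_false_iff, Ne, PySem.Set.contains_iff]
        intro hx; exact hm ((h c).1 hx)
      simp only [hc, Bool.false_eq_true, if_false, if_pos hm]
      refine ih _ _ ?_
      intro t
      rw [PySem.Set.mem_add]
      simp only [List.mem_append, List.mem_singleton]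
      constructor
      · rintro (ht | rfl)
        · exact Or.inl ((h t).1 ht)
        · exact Or.inr rfl
      · rintro (ht | rfl)
        · exact Or.inl ((h t).2 ht)
        · exact Or.inr rfl

lemma main_eq (S : List Int) (k : Int) (hp : Pre_k_subsets_better S k) :
    k_subsets_better S k = k_subsets_better_alt S k := by
  generalize hn : S.length = n
  induction n using Nat.strong_induction_on generalizing S k with
  | _ n ih =>
  subst hn
  rw [k_subsets_better.eq_def, k_subsets_better_alt.eq_def]
  by_cases hk : k = (S.length : Int)
  · simp [hk]
  · simp only [if_neg hk]
    have hlen : 1 < S.length := by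
      rcases hp with h | ⟨h1, h2⟩
      · exact absurd h hk
      · have : (1 : Int) < (S.length : Int) := by omega
        exact_mod_cast this
    have hpop : PySem.List.pop? S 1 = some (S[1], S.eraseIdx 1) := by
      have := PySem.List.pop?_natCast S 1 hlen
      simpa using this
    rw [hpop]
    have hpre : Pre_k_subsets_better (S.eraseIdx 1) k := by
      have hl : (S.eraseIdx 1).length = S.length - 1 := by
        simp [List.length_eraseIdx, hlen]
      rcases hp with h | ⟨h1, h2⟩
      · exact absurd h hk
      · by_cases he : k = ((S.eraseIdx 1).length : Int)
        · exact Or.inl he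
        · refine Or.inr ⟨h1, ?_⟩
          rw [hl]; push_cast [Nat.cast_sub (by omega : 1 ≤ S.length)] at he ⊢; omega
    have hrec : k_subsets_better (S.eraseIdx 1) k = k_subsets_better_alt (S.eraseIdx 1) k := by
      refine ih (S.eraseIdx 1).length ?_ _ _ hpre rfl
      simp [List.length_eraseIdx, hlen]
      omega
    simp only [hrec]
    rw [foldl_if_and, filter_power_set, foldl_pair]
    intro t
    simp [PySem.Set.mem_ofList]

-- ===== VERDICT (by name: the statement is the Claim_ definition above) =====
theorem k_subsets_better_spec : Claim_equal_k_subsets_better := by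
  intro S k _ hp
  exact main_eq S k hp
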